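-- pv_equiv track=rewrite | github.com/avsmith/adventofcode | 2018/day07.py | find_step
-- ===== SOURCE A (Python) =====
-- def find_step(s, n=1):
--     s.sort()
--     second = set()
--     for sx in s:
--         snd = sx[1]
--         second.add(snd)
--     possible = []
--     for lets in s:
--         if lets[0] not in second:
--             possible.append(lets[0])
--     possible = reduce(possible)
--     possible.sort()
--     return possible[0:n]
--
-- def reduce(s):
--     s = list(set(s))
--     return s
-- ===== SOURCE B (Python) =====
-- def find_step(s, n=1):
--     s.sort()
--     firsts = sorted(set(x[0] for x in s))
--     seconds = sorted(set(x[1] for x in s))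
--     res = []
--     i = j = 0
--     while i < len(firsts):
--         if j < len(seconds) and seconds[j] < firsts[i]:
--             j += 1
--         elif j < len(seconds) and seconds[j] == firsts[i]:
--             i += 1
--         else:
--             res.append(firsts[i])
--             i += 1
--     return res[:n]
-- ===== Notes on version B (the rewrite author's own statement) =====
-- stated objective: alternative
-- what changed: Replaced A's hash-set membership filter plus reduce() dedup and final sort by a two-pointer merge walk over the two sorted deduplicated letter lists, computing the sorted difference directly without any membership test.
import Mathlib
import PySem

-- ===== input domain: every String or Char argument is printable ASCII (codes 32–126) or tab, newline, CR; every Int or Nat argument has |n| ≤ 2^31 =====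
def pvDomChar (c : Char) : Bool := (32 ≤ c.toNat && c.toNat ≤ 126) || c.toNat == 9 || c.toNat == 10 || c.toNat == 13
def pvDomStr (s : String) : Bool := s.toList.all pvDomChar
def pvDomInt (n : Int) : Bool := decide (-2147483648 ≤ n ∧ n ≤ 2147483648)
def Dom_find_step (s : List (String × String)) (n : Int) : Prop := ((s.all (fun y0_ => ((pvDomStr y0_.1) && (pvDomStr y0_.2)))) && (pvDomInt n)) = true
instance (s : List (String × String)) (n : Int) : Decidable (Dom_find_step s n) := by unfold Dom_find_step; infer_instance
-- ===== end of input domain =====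

-- B replaces A's hash-set filter + reduce() dedup + final sort by a two-pointer merge
-- of the two sorted deduplicated letter lists (alternative algorithm; same return value;
-- both sort the argument in place in Python, the equivalence proved is about the return value).

-- ===== PORT A =====
def find_step (s : List (String × String)) (n : Int) : List String :=
  let s := PySem.List.sorted2 s (fun x => x.1) (fun x => x.2) false   -- s.sort()
  let second : PySem.Set String :=
    s.foldl (fun sec sx => PySem.Set.add sec sx.2) PySem.Set.empty
  let possible : List String :=
    s.foldl (fun acc lets =>
      if !(PySem.Set.contains second lets.1) then acc ++ [lets.1] else acc) []
  -- reduce(possible) = list(set(possible)); its order is irrelevant as it is sorted next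
  let possible := PySem.Set.ofList possible
  let possible := PySem.List.sorted possible (fun x => x) false
  PySem.List.slice possible (some 0) (some n)

-- ===== PORT B =====
-- the while loop over indices i, j, recursing on the two list suffixes
def pvMergeDiff : List String → List String → List String
  | [], _ => []
  | f :: fs, [] => f :: pvMergeDiff fs []
  | f :: fs, s2 :: ss =>
      if s2 < f then pvMergeDiff (f :: fs) ss
      else if s2 == f then pvMergeDiff fs (s2 :: ss)
      else f :: pvMergeDiff fs (s2 :: ss)
termination_by fs ss => fs.length + ss.length

def find_step_alt (s : List (String × String)) (n : Int) : List String :=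
  let s := PySem.List.sorted2 s (fun x => x.1) (fun x => x.2) false   -- s.sort()
  let firsts := PySem.List.sorted (PySem.Set.ofList (s.map Prod.fst)) (fun x => x) false
  let seconds := PySem.List.sorted (PySem.Set.ofList (s.map Prod.snd)) (fun x => x) false
  PySem.List.slice (pvMergeDiff firsts seconds) none (some n)

-- ===== PRECONDITION & SPEC =====
def Spec_find_step (s : List (String × String)) (n : Int) (out : List String) : Prop := out = find_step_alt s n
instance (s : List (String × String)) (n : Int) (out : List String) : Decidable (Spec_find_step s n out) := by unfold Spec_find_step; infer_instance

-- ===== CLAIM (what is proved, stated in full; the proofs are below) =====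
def Claim_equal_find_step : Prop := ∀ (s : List (String × String)) (n : Int), Dom_find_step s n → Spec_find_step s n (find_step s n)

-- ===== LEMMAS AND PROOFS =====

-- A's second-set loop is set(map snd s)
theorem pv_second_eq (ss : List (String × String)) :
    ss.foldl (fun sec sx => PySem.Set.add sec sx.2) PySem.Set.empty
      = PySem.Set.ofList (ss.map Prod.snd) := by
  rw [← PySem.Set.update_map_eq_foldl_add, PySem.Set.update_empty]

-- the merge walk on strictly increasing lists is the filtered first list
theorem pvMergeDiff_eq_filter : ∀ (fs ss : List String),
    fs.Pairwise (· < ·) → ss.Pairwise (· < ·) →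
    pvMergeDiff fs ss = fs.filter (fun a => decide (a ∉ ss))
  | [], ss, _, _ => by simp [pvMergeDiff]
  | f :: fs, [], hf, _ => by
      simp [pvMergeDiff, pvMergeDiff_eq_filter fs [] (List.pairwise_cons.mp hf).2 List.Pairwise.nil]
  | f :: fs, s2 :: ss, hf, hs => by
      obtain ⟨hfall, hf'⟩ := List.pairwise_cons.mp hf
      obtain ⟨hsall, hs'⟩ := List.pairwise_cons.mp hs
      by_cases h1 : s2 < f
      · rw [pvMergeDiff]
        simp only [h1, if_pos]
        rw [pvMergeDiff_eq_filter (f :: fs) ss hf hs']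
        apply List.filter_congr
        intro a ha
        have haf : f ≤ a := by
          rcases List.mem_cons.mp ha with h | h
          · exact le_of_eq h.symm
          · exact le_of_lt (hfall a h)
        have : a ≠ s2 := fun he => absurd (he ▸ haf) (not_le.mpr h1)
        simp [List.mem_cons, this]
      · by_cases h2 : s2 = f
        · subst h2
          rw [pvMergeDiff]
          simp only [lt_irrefl, if_false, beq_self_eq_true, if_pos]
          rw [pvMergeDiff_eq_filter fs (s2 :: ss) hf' hs]
          simp
        · have hlt : f < s2 := lt_of_le_of_ne (not_lt.mp h1) (fun he => h2 he.symm)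
          rw [pvMergeDiff]
          have hbeq : (s2 == f) = false := by simp [h2]
          simp only [h1, if_neg, hbeq, Bool.false_eq_true, not_false_iff]
          rw [pvMergeDiff_eq_filter fs (s2 :: ss) hf' hs]
          have hne : f ≠ s2 := ne_of_lt hlt
          have hns : f ∉ ss := fun h => absurd (hsall f h) (not_lt.mpr (le_of_lt hlt))
          simp [hne, hns]
termination_by fs ss => fs.length + ss.length

-- A's sorted deduplicated difference is B's merge walk over the two sorted dedup'd lists
theorem pv_main (ss : List (String × String)) :
    PySem.List.sorted
      (PySem.Set.ofList
        (ss.foldl (fun acc lets =>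
          if !(PySem.Set.contains
                 (PySem.Set.ofList (ss.map Prod.snd)) lets.1)
          then acc ++ [lets.1] else acc) []))
      (fun x => x) false
    = pvMergeDiff
        (PySem.List.sorted (PySem.Set.ofList (ss.map Prod.fst)) (fun x => x) false)
        (PySem.List.sorted (PySem.Set.ofList (ss.map Prod.snd)) (fun x => x) false) := by
  rw [pvMergeDiff_eq_filter _ _ (PySem.List.sorted_ofList_pairwise_lt _)
        (PySem.List.sorted_ofList_pairwise_lt _)]
  apply PySem.List.sorted_eq_of_perm_of_pairwise_lt
  · -- permutation: same distinct elements
    rw [List.perm_ext_iff_of_nodup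
          ((PySem.List.sorted_ofList_pairwise_lt (ss.map Prod.fst)).imp ne_of_lt |>.filter _)
          (PySem.Set.nodup_ofList _)]
    intro y
    rw [PySem.Set.mem_ofList,
        PySem.List.foldl_append_if
          (fun lets => !(PySem.Set.contains (PySem.Set.ofList (ss.map Prod.snd)) lets.1))
          Prod.fst]
    simp [PySem.Set.mem_ofList, PySem.List.mem_sorted, List.mem_filter, List.mem_map]
  · exact (PySem.List.sorted_ofList_pairwise_lt _).filter _

-- ===== VERDICT (by name: the statement is the Claim_ definition above) =====
theorem find_step_spec : Claim_equal_find_step := by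
  intro s n _
  show _ = _
  unfold find_step find_step_alt
  simp only [pv_second_eq]
  rw [pv_main]
  simp [PySem.List.slice_zero_start]
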